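-- pv_equiv track=rewrite | github.com/Cyl94700/P2_Op_Cl | functions.py | short_image_title
-- ===== SOURCE A (Python) =====
-- def short_image_title(image_title):
--     """
--     Cette fonction raccourcit et nettoie le titre du livre de caractères interdits
--     pour servir de nom au fichier image téléchargé
--     En entrée : image_title
--     En sortie : short_title
--     """
--     # Liste de caractères indésirables
--     characters_filter = [',', ';', '’', '/', '\\',
--                          ':', '*', '?', '"', '<', '>', '|']
--     for character in characters_filter:
--         image_title = image_title.replace(character, '')  # Nettoyage du titre
--     title_list = image_title.split()
--     # Détermine le nombre de mots du nom de l'image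
--     if len(title_list) > 10:
--         nb_words_title_img = 5
--     else:
--         nb_words_title_img = len(title_list)
--     # Reconstruit un titre avec maximum les 5 premiers mots et des underscores
--     image_title = "_".join(title_list[:nb_words_title_img])
--     return image_title
-- ===== SOURCE B (Python) =====
-- def short_image_title(image_title):
--     forbidden = set(',;\u2019/\\:*?"<>|')
--     cleaned = ''.join(ch for ch in image_title if ch not in forbidden)
--     words = cleaned.split()
--     return "_".join(words[:5] if len(words) > 10 else words)
-- ===== Notes on version B (the rewrite author's own statement) =====
-- stated objective: idiomatic
-- what changed: Replaces the loop of 12 whole-string .replace passes with a single character-level pass filtering against a set of forbidden characters, and folds the word-count branch into one join expression.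
import Mathlib
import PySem

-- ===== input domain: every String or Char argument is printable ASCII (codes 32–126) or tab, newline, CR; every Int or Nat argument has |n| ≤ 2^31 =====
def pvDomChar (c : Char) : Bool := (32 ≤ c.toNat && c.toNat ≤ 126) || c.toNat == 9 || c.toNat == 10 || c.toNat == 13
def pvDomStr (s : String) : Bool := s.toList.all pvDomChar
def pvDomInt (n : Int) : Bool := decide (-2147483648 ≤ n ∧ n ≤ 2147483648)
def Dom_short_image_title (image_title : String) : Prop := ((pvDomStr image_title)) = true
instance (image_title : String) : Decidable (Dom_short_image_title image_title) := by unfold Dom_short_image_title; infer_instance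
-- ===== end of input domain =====

-- B replaces A's loop of 12 whole-string replace passes by a single character-level
-- filter against a set of forbidden characters (objective: idiomatic single pass).

-- ===== PORT A =====
-- A's list of forbidden characters, each a one-character Python string
def charactersFilterA : List String :=
  [",", ";", "’", "/", "\\", ":", "*", "?", "\"", "<", ">", "|"]

def short_image_title (image_title : String) : String :=
  -- for character in characters_filter: image_title = image_title.replace(character, '')
  let cleaned := charactersFilterA.foldl (fun s ch => PySem.Str.replace s ch "") image_title
  let title_list := PySem.Str.split₀ cleaned
  let nb_words_title_img : Int := if (title_list.length : Int) > 10 then 5 else (title_list.length : Int)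
  PySem.Str.join "_" (PySem.List.slice title_list none (some nb_words_title_img))

-- ===== PORT B =====
-- forbidden = set(',;’/\:*?"<>|')
def forbiddenB : PySem.Set Char := PySem.Set.ofList ",;’/\\:*?\"<>|".toList

def short_image_title_alt (image_title : String) : String :=
  let cleaned := String.ofList (image_title.toList.filter (fun ch => !(decide (ch ∈ forbiddenB))))
  let words := PySem.Str.split₀ cleaned
  PySem.Str.join "_" (if words.length > 10 then words.take 5 else words)

-- ===== PRECONDITION & SPEC =====
def Spec_short_image_title (image_title : String) (out : String) : Prop := out = short_image_title_alt image_title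
instance (image_title : String) (out : String) : Decidable (Spec_short_image_title image_title out) := by unfold Spec_short_image_title; infer_instance

-- ===== CLAIM (what is proved, stated in full; the proofs are below) =====
def Claim_equal_short_image_title : Prop := ∀ (image_title : String), Dom_short_image_title image_title → Spec_short_image_title image_title (short_image_title image_title)

-- ===== LEMMAS AND PROOFS =====

-- replace.go on a single-character pattern with empty replacement is a character filter
theorem replace_go_single (c : Char) :
    ∀ (fuel : Nat) (l acc : List Char), l.length ≤ fuel →
      PySem.Chars.replace.go [c] [] fuel l acc =
        acc.reverse ++ l.filter (fun d => !(d == c)) := by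
  intro fuel
  induction fuel with
  | zero =>
    intro l acc h
    have : l = [] := List.eq_nil_of_length_eq_zero (Nat.le_zero.mp h)
    subst this
    simp [PySem.Chars.replace.go]
  | succ n ih =>
    intro l acc h
    cases l with
    | nil => simp [PySem.Chars.replace.go]
    | cons x t =>
      simp only [PySem.Chars.replace.go]
      by_cases hx : x = c
      · subst hx
        have hp : List.isPrefixOf [x] (x :: t) = true := by simp [List.isPrefixOf]
        simp only [hp, if_pos, List.length_cons, List.drop_succ_cons, List.drop_zero,
          List.length_nil, List.reverse_nil, List.nil_append]
        rw [ih t acc (by simpa using Nat.succ_le_succ_iff.mp h)]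
        simp
      · have hp : List.isPrefixOf [c] (x :: t) = false := by
          simp [List.isPrefixOf]; exact fun hh => (hx hh.symm).elim
        simp only [hp]
        rw [if_neg (by simp)]
        rw [ih t (x :: acc) (by simpa using Nat.succ_le_succ_iff.mp h)]
        simp [hx]

-- s.replace(c, '') for a one-character pattern c is a character filter
theorem replace_single (c : Char) (cs : List Char) :
    PySem.Chars.replace cs [c] [] = cs.filter (fun d => !(d == c)) := by
  rw [PySem.Chars.replace]
  simp only [List.isEmpty_cons]
  exact replace_go_single c cs.length cs [] le_rfl

theorem replace_single_str (t : String) (cstr : String) (c : Char)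
    (h : cstr.toList = [c]) :
    (PySem.Str.replace t cstr "").toList = t.toList.filter (fun d => !(d == c)) := by
  rw [PySem.Str.toList_replace, h]
  have he : ("" : String).toList = [] := rfl
  rw [he]
  exact replace_single c t.toList

-- the cleaned strings of A and B have the same characters
theorem cleaned_eq (s : String) :
    (charactersFilterA.foldl (fun t ch => PySem.Str.replace t ch "") s).toList =
      s.toList.filter (fun ch => !(decide (ch ∈ forbiddenB))) := by
  simp only [charactersFilterA, List.foldl_cons, List.foldl_nil]
  rw [replace_single_str _ "|" '|' rfl,
      replace_single_str _ ">" '>' rfl,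
      replace_single_str _ "<" '<' rfl,
      replace_single_str _ "\"" '"' rfl,
      replace_single_str _ "?" '?' rfl,
      replace_single_str _ "*" '*' rfl,
      replace_single_str _ ":" ':' rfl,
      replace_single_str _ "\\" '\\' rfl,
      replace_single_str _ "/" '/' rfl,
      replace_single_str _ "’" '’' rfl,
      replace_single_str _ ";" ';' rfl,
      replace_single_str _ "," ',' rfl]
  simp only [List.filter_filter]
  apply List.filter_congr
  intro a _
  have hmem : (a ∈ forbiddenB) ↔ (a ∈ ",;’/\\:*?\"<>|".toList) :=
    PySem.Set.mem_ofList _ a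
  have hlist : (",;’/\\:*?\"<>|".toList : List Char)
      = [',', ';', '’', '/', '\\', ':', '*', '?', '"', '<', '>', '|'] := rfl
  rw [Bool.eq_iff_iff]
  simp only [Bool.and_eq_true, Bool.not_eq_eq_eq_not, Bool.not_true, beq_eq_false_iff_ne,
    ne_eq, decide_eq_false_iff_not, hmem, hlist, List.mem_cons,
    List.not_mem_nil, or_false]
  tauto

-- ===== VERDICT (by name: the statement is the Claim_ definition above) =====
theorem short_image_title_spec : Claim_equal_short_image_title := by
  intro s _
  unfold Spec_short_image_title short_image_title short_image_title_alt
  dsimp only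
  have hc : (charactersFilterA.foldl (fun t ch => PySem.Str.replace t ch "") s)
      = String.ofList (s.toList.filter (fun ch => !(decide (ch ∈ forbiddenB)))) := by
    apply String.toList_inj.mp
    rw [cleaned_eq]
    simp
  rw [hc]
  set ws := PySem.Str.split₀
    (String.ofList (s.toList.filter (fun ch => !(decide (ch ∈ forbiddenB))))) with hws
  by_cases h : ws.length > 10
  · have h' : ((ws.length : Int) > 10) := by exact_mod_cast h
    rw [if_pos h', if_pos h]
    rw [PySem.List.slice_to ws (by norm_num : (0:Int) ≤ 5)]
    rfl
  · have h' : ¬ ((ws.length : Int) > 10) := by exact_mod_cast h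
    rw [if_neg h', if_neg h]
    rw [PySem.List.slice_to ws (by positivity)]
    simp
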